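-- pv_equiv track=rewrite | github.com/AlmazKh/info-retrieval | TermsGenerator.py | and_operation
-- ===== SOURCE A (Python) =====
-- def and_operation(docs_array_after_not):
--     response = []
--     count = dict()
--     value = 0
--     i = 0
--     for elem in docs_array_after_not:
--         if elem is not None:
--             for it in elem.values():
--                 value += int(it)
--             count.update({i: value})
--             value = 0
--         i += 1
--
--     count = {k: v for k, v in sorted(count.items(), key=lambda it_: it_[1])}
--
--     iter_count = iter(count)
--     if docs_array_after_not[next(iter(count))] is not None:
--         response = list(docs_array_after_not[next(iter(count))].keys())
--     for item in iter_count: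
--         if docs_array_after_not[item] is not None:
--             response = intersection(response, docs_array_after_not[item].keys())
--     return response
--
-- def intersection(lst1, lst2):
--     lst3 = [value for value in lst1 if value in lst2]
--     return lst3
-- ===== SOURCE B (Python) =====
-- def and_operation(docs_array_after_not):
--     sums = [(i, sum(int(v) for v in d.values()))
--             for i, d in enumerate(docs_array_after_not) if d is not None]
--     base_i = min(sums, key=lambda p: p[1])[0]
--     others = [docs_array_after_not[j] for j, _ in sums if j != base_i]
--     return [k for k in docs_array_after_not[base_i] if all(k in d for d in others)]
-- ===== Notes on version B (the rewrite author's own statement) =====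
-- stated objective: simpler
-- what changed: B replaces A's build-a-dict-of-sums, full stable sort, and chain of pairwise list intersections by a single min-by-sum selection (ties to the smallest index, as the stable sort gives) followed by one filter of the base dict's keys against membership in every other non-None dict.
import Mathlib
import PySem

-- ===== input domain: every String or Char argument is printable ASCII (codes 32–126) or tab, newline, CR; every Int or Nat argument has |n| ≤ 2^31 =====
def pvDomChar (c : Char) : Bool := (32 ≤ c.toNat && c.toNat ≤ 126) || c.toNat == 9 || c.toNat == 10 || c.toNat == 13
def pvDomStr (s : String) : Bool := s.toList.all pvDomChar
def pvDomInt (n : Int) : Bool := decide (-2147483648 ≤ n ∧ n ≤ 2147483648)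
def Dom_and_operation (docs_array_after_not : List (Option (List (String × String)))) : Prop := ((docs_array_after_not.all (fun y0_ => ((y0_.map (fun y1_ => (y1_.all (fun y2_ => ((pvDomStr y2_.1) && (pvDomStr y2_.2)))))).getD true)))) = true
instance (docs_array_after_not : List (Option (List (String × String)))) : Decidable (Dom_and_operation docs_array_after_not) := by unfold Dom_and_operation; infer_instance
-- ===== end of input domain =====

-- B replaces A's dict-of-sums + full stable sort + chained pairwise intersections by one
-- min-by-sum selection (ties to the smallest index) and a single filter of the base dict's
-- keys against membership in every other non-None dict. Equivalence on Pre_ (some non-None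
-- element, all values int-parsable).

-- ===== PORT A =====
-- intersection(lst1, lst2)
def pyIntersection (lst1 lst2 : List String) : List String :=
  lst1.filter (fun value => lst2.contains value)

def and_operation (docs_array_after_not : List (Option (List (String × String)))) : List String :=
  -- first loop: count = {i: sum(int(it) for it in elem.values())} for non-None elem, i the running index
  let st := docs_array_after_not.foldl
    (fun (st : PySem.Dict Int Int × Int) elem =>
      match elem with
      | some e =>
          (st.1.insert st.2 (e.foldl (fun value it => value + (PySem.Int.ofStr? it.2).getD 0) 0),
           st.2 + 1)
      | none => (st.1, st.2 + 1))
    (PySem.Dict.empty, 0)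
  -- count = {k: v for k, v in sorted(count.items(), key=lambda it_: it_[1])}
  let sortedItems := PySem.List.sorted st.1.items (fun it_ => it_.2) false
  match sortedItems with
  | [] => []   -- Python raises StopIteration here (no non-None dict); excluded by Pre_
  | (k0, _) :: _ =>
    let response :=
      match PySem.List.pyGetD docs_array_after_not k0 none with
      | some d => d.map (fun p => p.1)
      | none => []
    -- for item in iter_count: … (iter_count was never advanced, so it runs over ALL sorted keys)
    sortedItems.foldl
      (fun resp item =>
        match PySem.List.pyGetD docs_array_after_not item.1 none with
        | some d => pyIntersection resp (d.map (fun p => p.1))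
        | none => resp)
      response

-- ===== PORT B =====
-- sum(int(v) for v in d.values())
def pvRowSum (d : List (String × String)) : Int :=
  (d.map (fun it => (PySem.Int.ofStr? it.2).getD 0)).sum

def and_operation_alt (docs_array_after_not : List (Option (List (String × String)))) : List String :=
  let sums := (PySem.List.enumerate docs_array_after_not 0).filterMap
    (fun p => match p.2 with
      | some d => some (p.1, pvRowSum d)
      | none => none)
  match PySem.List.min? sums (fun p => p.2) with
  | none => []   -- Python min([]) raises ValueError; excluded by Pre_
  | some b =>
    let baseI := b.1
    let others := sums.filterMap (fun q =>
      if q.1 = baseI then none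
      else some (((PySem.List.pyGetD docs_array_after_not q.1 none).getD []).map (fun p => p.1)))
    (((PySem.List.pyGetD docs_array_after_not baseI none).getD []).map (fun p => p.1)).filter
      (fun k => others.all (fun ks => ks.contains k))

-- ===== PRECONDITION & SPEC =====
-- Pre_ excludes exactly the inputs where the Python A raises: StopIteration when no element is a
-- dict (all None or empty list), and ValueError when some dict value does not parse as an int.
def Pre_and_operation (docs_array_after_not : List (Option (List (String × String)))) : Prop :=
  (∃ e ∈ docs_array_after_not, e.isSome) ∧
  (∀ e ∈ docs_array_after_not, ∀ d : List (String × String), e = some d →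
    ∀ p ∈ d, (PySem.Int.ofStr? p.2).isSome)
instance (docs_array_after_not : List (Option (List (String × String)))) : Decidable (Pre_and_operation docs_array_after_not) := by unfold Pre_and_operation; infer_instance

def pvWitness_and_operation : (List (Option (List (String × String)))) :=
  [some [("a", "1"), ("b", "2")], none, some [("a", "3")]]

def Spec_and_operation (docs_array_after_not : List (Option (List (String × String)))) (out : List String) : Prop := out = and_operation_alt docs_array_after_not
instance (docs_array_after_not : List (Option (List (String × String)))) (out : List String) : Decidable (Spec_and_operation docs_array_after_not out) := by unfold Spec_and_operation; infer_instance

-- ===== CLAIM (what is proved, stated in full; the proofs are below) =====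
def Claim_equal_and_operation : Prop := ∀ (docs_array_after_not : List (Option (List (String × String)))), Dom_and_operation docs_array_after_not → Pre_and_operation docs_array_after_not → Spec_and_operation docs_array_after_not (and_operation docs_array_after_not)

-- ===== LEMMAS AND PROOFS =====

-- the list of (index, value-sum) pairs both programs are about
def pvSums (docs : List (Option (List (String × String)))) : List (Int × Int) :=
  (PySem.List.enumerate docs 0).filterMap
    (fun p => match p.2 with
      | some d => some (p.1, pvRowSum d)
      | none => none)

-- A's first loop builds exactly the pvSums association list
theorem pvCountItems (docs : List (Option (List (String × String))))
    (d : PySem.Dict Int Int) (i : Int) (h : ∀ j : Int, i ≤ j → d.contains j = false) :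
    (docs.foldl
      (fun (st : PySem.Dict Int Int × Int) elem =>
        match elem with
        | some e =>
            (st.1.insert st.2 (e.foldl (fun value it => value + (PySem.Int.ofStr? it.2).getD 0) 0),
             st.2 + 1)
        | none => (st.1, st.2 + 1)) (d, i)).1.items
    = d.items ++ (PySem.List.enumerate docs i).filterMap
        (fun p => match p.2 with
          | some e => some (p.1, pvRowSum e)
          | none => none) := by
  induction docs generalizing d i with
  | nil => simp
  | cons x t ih =>
    cases x with
    | none =>
      simp only [List.foldl_cons, PySem.List.enumerate_cons, List.filterMap_cons]
      exact ih d (i + 1) (fun j hj => h j (by omega))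
    | some e =>
      simp only [List.foldl_cons, PySem.List.enumerate_cons, List.filterMap_cons]
      have hins : ∀ j : Int, i + 1 ≤ j →
          (d.insert i (e.foldl (fun value it => value + (PySem.Int.ofStr? it.2).getD 0) 0)).contains j = false := by
        intro j hj
        rw [PySem.Dict.contains_insert]
        have : (j == i) = false := by simp; omega
        rw [this, h j (by omega)]
        rfl
      rw [ih _ (i + 1) hins,
        PySem.Dict.items_insert_of_not_contains d _ (h i le_rfl)]
      have hsum : e.foldl (fun value it => value + (PySem.Int.ofStr? it.2).getD 0) 0 = pvRowSum e := by
        rw [PySem.List.foldl_add]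
        simp [pvRowSum]
      rw [hsum]
      simp

-- head of the stable sort = Python's min (first minimal element)
theorem pvHeadInsertBy {α : Type} (key : α → Int) (x : α) (ys : List α) :
    (PySem.List.insertBy (fun a b => decide (key a < key b)) x ys).head? =
      some (match ys with
            | [] => x
            | y :: _ => if key x < key y then x else y) := by
  cases ys with
  | nil => rfl
  | cons y t =>
    simp only [PySem.List.insertBy]
    split_ifs with h <;> simp_all

theorem pvMinHeadSorted {α : Type} (xs : List α) (key : α → Int) :
    PySem.List.min? xs key = (PySem.List.sorted xs key false).head? := by
  induction xs using List.reverseRecOn with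
  | nil => rfl
  | append_singleton xs x ih =>
    have hmin : PySem.List.min? (xs ++ [x]) key =
        (match PySem.List.min? xs key with
         | none => some x
         | some m => if key x < key m then some x else some m) := by
      simp only [PySem.List.min?, List.foldl_append, List.foldl_cons, List.foldl_nil]
      rfl
    have hsort : PySem.List.sorted (xs ++ [x]) key false =
        PySem.List.insertBy (fun a b => decide (key a < key b)) x
          (PySem.List.sorted xs key false) := by
      rw [PySem.List.sorted_eq_foldl_insertBy, PySem.List.sorted_eq_foldl_insertBy,
        List.foldl_append]
      rfl
    rw [hmin, hsort, pvHeadInsertBy]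
    cases hm : PySem.List.min? xs key with
    | none =>
      have : xs = [] := (PySem.List.min?_eq_none_iff xs key).mp hm
      subst this
      rfl
    | some m =>
      have hne : PySem.List.sorted xs key false ≠ [] := by
        intro h0
        have : xs = [] := (PySem.List.sorted_eq_nil_iff xs key false).mp h0
        subst this; simp [PySem.List.min?] at hm
      cases hs : PySem.List.sorted xs key false with
      | nil => exact absurd hs hne
      | cons y t =>
        rw [hm, hs] at ih
        simp only [List.head?] at ih
        cases ih
        show (if key x < key m then some x else some m) = some (if key x < key m then x else m)
        split_ifs <;> rfl

-- A's intersection loop is one filter by an 'all' membership test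
theorem pvFoldInter (docs : List (Option (List (String × String))))
    (l : List (Int × Int)) (r0 : List String) :
    l.foldl
      (fun resp item =>
        match PySem.List.pyGetD docs item.1 none with
        | some d => pyIntersection resp (d.map (fun p => p.1))
        | none => resp) r0
    = r0.filter (fun k => l.all (fun item =>
        match PySem.List.pyGetD docs item.1 none with
        | some d => (d.map (fun p => p.1)).contains k
        | none => true)) := by
  induction l generalizing r0 with
  | nil => simp
  | cons q t ih =>
    simp only [List.foldl_cons, List.all_cons]
    cases hq : PySem.List.pyGetD docs q.1 none with
    | none =>
      rw [ih]
      simp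
    | some d =>
      rw [ih]
      simp only [pyIntersection, List.filter_filter]
      apply List.filter_congr
      intro k _
      simp [Bool.and_comm]

theorem pvMemSums (docs : List (Option (List (String × String)))) (q : Int × Int)
    (h : q ∈ pvSums docs) :
    ∃ (n : Nat) (hn : n < docs.length) (e : List (String × String)),
      q.1 = (n : Int) ∧ docs[n] = some e ∧ q.2 = pvRowSum e := by
  simp only [pvSums, List.mem_filterMap] at h
  obtain ⟨p, hp, hf⟩ := h
  rw [PySem.List.mem_enumerate_iff] at hp
  obtain ⟨n, hn, rfl⟩ := hp
  cases he : docs[n] with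
  | none => rw [he] at hf; simp at hf
  | some e =>
    rw [he] at hf
    simp at hf
    exact ⟨n, hn, e, by simp [← hf], he, by simp [← hf]⟩

theorem pvSumsNe (docs : List (Option (List (String × String))))
    (h : ∃ e ∈ docs, e.isSome) : pvSums docs ≠ [] := by
  obtain ⟨e, he, hs⟩ := h
  obtain ⟨d, rfl⟩ := Option.isSome_iff_exists.mp hs
  obtain ⟨n, hn, hget⟩ := List.mem_iff_getElem.mp he
  have : ((n : Int), pvRowSum d) ∈ pvSums docs := by
    simp only [pvSums, List.mem_filterMap]
    refine ⟨((n : Int), some d), ?_, by simp⟩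
    rw [PySem.List.mem_enumerate_iff]
    exact ⟨n, hn, by simp [hget]⟩
  intro h0
  rw [h0] at this
  simp at this

theorem pvGet_of_mem (docs : List (Option (List (String × String)))) (q : Int × Int)
    (h : q ∈ pvSums docs) :
    ∃ e : List (String × String), PySem.List.pyGetD docs q.1 none = some e := by
  obtain ⟨n, hn, e, hq1, he, -⟩ := pvMemSums docs q h
  refine ⟨e, ?_⟩
  rw [hq1, PySem.List.pyGetD_natCast, List.getD_eq_getElem _ _ hn, he]

-- ===== VERDICT (by name: the statement is the Claim_ definition above) =====
theorem and_operation_spec : Claim_equal_and_operation := by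
  intro docs _ hpre
  obtain ⟨hne, -⟩ := hpre
  have hSne : pvSums docs ≠ [] := pvSumsNe docs hne
  unfold Spec_and_operation
  simp only [and_operation, and_operation_alt]
  have h0 : ∀ j : Int, (0:Int) ≤ j → (PySem.Dict.empty : PySem.Dict Int Int).contains j = false := by
    intro j _
    rfl
  have hitems := pvCountItems docs PySem.Dict.empty 0 h0
  rw [hitems]
  have hfold : PySem.Dict.empty.items ++ (PySem.List.enumerate docs 0).filterMap
      (fun p => match p.2 with
        | some e => some (p.1, pvRowSum e)
        | none => none) = pvSums docs := by
    rfl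
  rw [hfold]
  cases hSL : PySem.List.sorted (pvSums docs) (fun it_ => it_.2) false with
  | nil => exact absurd ((PySem.List.sorted_eq_nil_iff _ _ _).mp hSL) hSne
  | cons hd rest =>
    obtain ⟨k0, v0⟩ := hd
    have hmin : PySem.List.min? (pvSums docs) (fun p => p.2) = some (k0, v0) := by
      rw [pvMinHeadSorted, hSL]
      rfl
    have hmem : (k0, v0) ∈ pvSums docs := by
      rw [← PySem.List.mem_sorted (pvSums docs) (fun it_ => it_.2) false, hSL]
      exact List.mem_cons_self
    obtain ⟨n, hn, e, hk1, he, -⟩ := pvMemSums docs (k0, v0) hmem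
    have hg : PySem.List.pyGetD docs k0 none = some e := by
      have := hk1
      simp only at this
      rw [this, PySem.List.pyGetD_natCast, List.getD_eq_getElem _ _ hn, he]
    have hP : List.filterMap
        (fun p =>
          match p.2 with
          | some d => some (p.1, pvRowSum d)
          | none => none)
        (PySem.List.enumerate docs) = pvSums docs := rfl
    rw [hP, hmin]
    simp only [hg, Option.getD_some]
    rw [pvFoldInter]
    apply List.filter_congr
    intro k hk
    rw [List.all_filterMap]
    rw [Bool.eq_iff_iff, List.all_eq_true, List.all_eq_true]
    constructor
    · intro hall q hq
      have hq' : q ∈ (k0, v0) :: rest := by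
        rw [← hSL, PySem.List.mem_sorted]
        exact hq
      have := hall q hq'
      obtain ⟨eq, hgq⟩ := pvGet_of_mem docs q hq
      rw [hgq] at this
      by_cases hqk : q.1 = k0
      · simp [hqk]
      · simp only [hqk, ite_false]
        rw [hgq]
        simpa using this
    · intro hall q hq
      have hq' : q ∈ pvSums docs := by
        rw [← PySem.List.mem_sorted (pvSums docs) (fun it_ => it_.2) false, hSL]
        exact hq
      have := hall q hq'
      obtain ⟨eq, hgq⟩ := pvGet_of_mem docs q hq'
      rw [hgq]
      by_cases hqk : q.1 = k0
      · -- q points at the base dict: k ∈ its keys already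
        have heq : eq = e := by
          rw [hqk, hg] at hgq
          exact (Option.some_injective _ hgq).symm
        subst heq
        simpa using hk
      · simp only [hqk, ite_false] at this
        rw [hgq] at this
        simpa using this
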